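-- pv_equiv track=rewrite | github.com/LucasMayer02/UFCG_Exercicios | atividades/mini_testes/ordena_tipos/questao.py | ordena_tipos
-- ===== SOURCE A (Python) =====
-- def ordena_tipos(elementos) :
--     for i in range(len(elementos)) :
--         j = i
--         while j > 0 :
--             possui = False
--             if elementos[j].isdigit() :
--                 if not elementos[j-1].isdigit():
--                     elementos[j], elementos[j-1] = elementos[j-1], elementos[j]
--                     possui = True
--             elif elementos[j].isalpha():
--                 if elementos[j-1].isdigit() == False and elementos[j-1].isalpha() == False:
--                     elementos[j], elementos[j-1] = elementos[j-1], elementos[j]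
--                     possui = True
--             if not possui :
--                 break
--             j -= 1
--     return elementos
-- ===== SOURCE B (Python) =====
-- def ordena_tipos(elementos):
--     # One pass into three order-preserving buckets, then concatenate.
--     # Like A, mutates the input list in place and returns it.
--     digitos, letras, outros = [], [], []
--     for e in elementos:
--         if e.isdigit():
--             digitos.append(e)
--         elif e.isalpha():
--             letras.append(e)
--         else:
--             outros.append(e)
--     elementos[:] = digitos + letras + outros
--     return elementos
-- ===== Notes on version B (the rewrite author's own statement) =====
-- stated objective: alternative
-- what changed: Replaced A's index-based insertion sort (bubbling each element left with repeated swaps) by a single pass that distributes elements into three order-preserving buckets (digits, alphas, others) and concatenates them; like A, B mutates the list in place and returns it.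
import Mathlib
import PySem

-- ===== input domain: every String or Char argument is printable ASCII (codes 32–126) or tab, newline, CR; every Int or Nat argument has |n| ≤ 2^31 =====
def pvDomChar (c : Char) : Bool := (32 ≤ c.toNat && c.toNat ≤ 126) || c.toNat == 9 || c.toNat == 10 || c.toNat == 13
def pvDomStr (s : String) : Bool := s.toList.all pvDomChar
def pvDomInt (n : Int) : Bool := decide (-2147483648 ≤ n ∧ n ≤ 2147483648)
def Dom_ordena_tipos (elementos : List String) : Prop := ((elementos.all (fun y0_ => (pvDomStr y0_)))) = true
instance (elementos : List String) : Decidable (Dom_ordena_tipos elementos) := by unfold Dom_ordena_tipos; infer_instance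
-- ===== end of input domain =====

-- B replaces A's in-place insertion sort by one pass into three order-preserving buckets
-- (objective: alternative algorithm). Both Pythons mutate the argument list in place the
-- same way; the theorems below are about the returned value.

-- ===== PORT A =====
-- inner 'while j > 0' loop of A; the list indices j and j-1 read/written here always lie in
-- [0, len) (0 < j < len throughout A's run), where Python's xs[j] equals List.getD j and the
-- swap-assignment equals two List.set — exact on every input A reaches.
def ordenaInner (xs : List String) : Nat → List String
  | 0 => xs
  | j + 1 =>
    let cur := xs.getD (j + 1) ""
    let prev := xs.getD j ""
    if PySem.Str.strIsdigit cur then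
      if !PySem.Str.strIsdigit prev then
        ordenaInner ((xs.set (j + 1) prev).set j cur) j
      else xs
    else if PySem.Str.strIsalpha cur then
      if !PySem.Str.strIsdigit prev && !PySem.Str.strIsalpha prev then
        ordenaInner ((xs.set (j + 1) prev).set j cur) j
      else xs
    else xs

def ordena_tipos (elementos : List String) : List String :=
  (List.range elementos.length).foldl (fun xs i => ordenaInner xs i) elementos

-- ===== PORT B =====
def ordena_tipos_alt (elementos : List String) : List String :=
  let t := elementos.foldl
    (fun (acc : List String × List String × List String) e =>
      if PySem.Str.strIsdigit e then (acc.1 ++ [e], acc.2.1, acc.2.2)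
      else if PySem.Str.strIsalpha e then (acc.1, acc.2.1 ++ [e], acc.2.2)
      else (acc.1, acc.2.1, acc.2.2 ++ [e]))
    ([], [], [])
  t.1 ++ t.2.1 ++ t.2.2

-- ===== PRECONDITION & SPEC =====
def Spec_ordena_tipos (elementos : List String) (out : List String) : Prop := out = ordena_tipos_alt elementos
instance (elementos : List String) (out : List String) : Decidable (Spec_ordena_tipos elementos out) := by unfold Spec_ordena_tipos; infer_instance

-- ===== CLAIM (what is proved, stated in full; the proofs are below) =====
def Claim_equal_ordena_tipos : Prop := ∀ (elementos : List String), Dom_ordena_tipos elementos → Spec_ordena_tipos elementos (ordena_tipos elementos)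

-- ===== LEMMAS AND PROOFS =====

-- category predicates (mutually exclusive, exhaustive)
def pD (s : String) : Bool := PySem.Str.strIsdigit s
def pA (s : String) : Bool := !PySem.Str.strIsdigit s && PySem.Str.strIsalpha s
def pO (s : String) : Bool := !PySem.Str.strIsdigit s && !PySem.Str.strIsalpha s

lemma getD_at_len (u t : List String) (x : String) (d : String) :
    (u ++ x :: t).getD u.length d = x := by
  induction u with
  | nil => rfl
  | cons h u ih => simpa using ih

lemma set_at_len (u t : List String) (x v : String) :
    (u ++ x :: t).set u.length v = u ++ v :: t := by
  induction u with
  | nil => rfl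
  | cons h u ih => simpa using ih

lemma bubble_digit (x : String) (hx : PySem.Str.strIsdigit x = true) :
    ∀ (v : List String) (t u : List String),
      (∀ y ∈ v, PySem.Str.strIsdigit y = false) →
      (u = [] ∨ ∃ u' y, u = u' ++ [y] ∧ PySem.Str.strIsdigit y = true) →
      ordenaInner (u ++ v ++ x :: t) (u.length + v.length) = u ++ x :: (v ++ t) := by
  intro v
  induction v using List.reverseRecOn with
  | nil =>
    intro t u _ hu
    rcases hu with rfl | ⟨u', y, rfl, hy⟩
    · simp [ordenaInner]
    · have e2 : (u' ++ [y]).length + ([] : List String).length = u'.length + 1 := by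
        simp
      rw [e2, ordenaInner]
      have hc : (u' ++ [y] ++ [] ++ x :: t).getD (u'.length + 1) "" = x := by
        have e : u'.length + 1 = (u' ++ [y]).length := by simp
        have e' : u' ++ [y] ++ [] ++ x :: t = (u' ++ [y]) ++ x :: t := by simp
        rw [e, e']; exact getD_at_len (u' ++ [y]) t x ""
      have hp : (u' ++ [y] ++ [] ++ x :: t).getD u'.length "" = y := by
        have e' : u' ++ [y] ++ [] ++ x :: t = u' ++ y :: x :: t := by simp
        rw [e']; exact getD_at_len u' (x :: t) y ""
      rw [hc, hp, hx, hy]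
      simp
  | append_singleton v' y ih =>
    intro t u hv hu
    have hy : PySem.Str.strIsdigit y = false := hv y (by simp)
    have e1 : u ++ (v' ++ [y]) ++ x :: t = u ++ v' ++ [y] ++ x :: t := by
      simp [List.append_assoc]
    have e2 : u.length + (v' ++ [y]).length = (u ++ v').length + 1 := by
      simp only [List.length_append, List.length_cons, List.length_nil]; omega
    rw [e1, e2, ordenaInner]
    have hc : (u ++ v' ++ [y] ++ x :: t).getD ((u ++ v').length + 1) "" = x := by
      have e : (u ++ v').length + 1 = (u ++ v' ++ [y]).length := by simp [Nat.add_assoc]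
      rw [e]; exact getD_at_len (u ++ v' ++ [y]) t x ""
    have hp : (u ++ v' ++ [y] ++ x :: t).getD (u ++ v').length "" = y := by
      have e : u ++ v' ++ [y] ++ x :: t = (u ++ v') ++ y :: x :: t := by simp
      rw [e]; exact getD_at_len (u ++ v') (x :: t) y ""
    rw [hc, hp]
    have hs : ((u ++ v' ++ [y] ++ x :: t).set ((u ++ v').length + 1) y).set
        (u ++ v').length x = u ++ v' ++ x :: y :: t := by
      have e : (u ++ v').length + 1 = (u ++ v' ++ [y]).length := by simp [Nat.add_assoc]
      have h1 : (u ++ v' ++ [y] ++ x :: t).set ((u ++ v').length + 1) y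
          = (u ++ v') ++ y :: y :: t := by
        rw [e]
        have := set_at_len (u ++ v' ++ [y]) t x y
        rw [this]; simp
      rw [h1]; exact set_at_len (u ++ v') (y :: t) y x
    rw [hs, hx, hy]
    have h := ih (y :: t) u (fun z hz => hv z (by simp [hz])) hu
    simp only [List.length_append] at h ⊢
    simpa [List.append_assoc] using h

lemma bubble_alpha (x : String) (hxd : PySem.Str.strIsdigit x = false)
    (hxa : PySem.Str.strIsalpha x = true) :
    ∀ (v : List String) (t u : List String),
      (∀ y ∈ v, PySem.Str.strIsdigit y = false ∧ PySem.Str.strIsalpha y = false) →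
      (u = [] ∨ ∃ u' y, u = u' ++ [y] ∧
        (PySem.Str.strIsdigit y || PySem.Str.strIsalpha y) = true) →
      ordenaInner (u ++ v ++ x :: t) (u.length + v.length) = u ++ x :: (v ++ t) := by
  intro v
  induction v using List.reverseRecOn with
  | nil =>
    intro t u _ hu
    rcases hu with rfl | ⟨u', y, rfl, hy⟩
    · simp [ordenaInner]
    · have e2 : (u' ++ [y]).length + ([] : List String).length = u'.length + 1 := by
        simp
      rw [e2, ordenaInner]
      have hc : (u' ++ [y] ++ [] ++ x :: t).getD (u'.length + 1) "" = x := by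
        have e : u'.length + 1 = (u' ++ [y]).length := by simp
        have e' : u' ++ [y] ++ [] ++ x :: t = (u' ++ [y]) ++ x :: t := by simp
        rw [e, e']; exact getD_at_len (u' ++ [y]) t x ""
      have hp : (u' ++ [y] ++ [] ++ x :: t).getD u'.length "" = y := by
        have e' : u' ++ [y] ++ [] ++ x :: t = u' ++ y :: x :: t := by simp
        rw [e']; exact getD_at_len u' (x :: t) y ""
      rw [hc, hp, hxd, hxa]
      cases hyd : PySem.Str.strIsdigit y with
      | true => simp [hyd]
      | false =>
        have hya : PySem.Str.strIsalpha y = true := by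
          cases h : PySem.Str.strIsalpha y
          · rw [hyd, h] at hy; simp at hy
          · rfl
        have hyd' : PySem.Chars.strIsdigit y.toList = false := by simpa using hyd
        have hya' : PySem.Chars.strIsalpha y.toList = true := by simpa using hya
        simp [hyd', hya']
  | append_singleton v' y ih =>
    intro t u hv hu
    obtain ⟨hyd, hya⟩ := hv y (by simp)
    have e1 : u ++ (v' ++ [y]) ++ x :: t = u ++ v' ++ [y] ++ x :: t := by
      simp [List.append_assoc]
    have e2 : u.length + (v' ++ [y]).length = (u ++ v').length + 1 := by
      simp only [List.length_append, List.length_cons, List.length_nil]; omega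
    rw [e1, e2, ordenaInner]
    have hc : (u ++ v' ++ [y] ++ x :: t).getD ((u ++ v').length + 1) "" = x := by
      have e : (u ++ v').length + 1 = (u ++ v' ++ [y]).length := by simp [Nat.add_assoc]
      rw [e]; exact getD_at_len (u ++ v' ++ [y]) t x ""
    have hp : (u ++ v' ++ [y] ++ x :: t).getD (u ++ v').length "" = y := by
      have e : u ++ v' ++ [y] ++ x :: t = (u ++ v') ++ y :: x :: t := by simp
      rw [e]; exact getD_at_len (u ++ v') (x :: t) y ""
    rw [hc, hp]
    have hs : ((u ++ v' ++ [y] ++ x :: t).set ((u ++ v').length + 1) y).set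
        (u ++ v').length x = u ++ v' ++ x :: y :: t := by
      have e : (u ++ v').length + 1 = (u ++ v' ++ [y]).length := by simp [Nat.add_assoc]
      have h1 : (u ++ v' ++ [y] ++ x :: t).set ((u ++ v').length + 1) y
          = (u ++ v') ++ y :: y :: t := by
        rw [e]
        have := set_at_len (u ++ v' ++ [y]) t x y
        rw [this]; simp
      rw [h1]; exact set_at_len (u ++ v') (y :: t) y x
    rw [hs, hxd, hxa, hyd, hya]
    have h := ih (y :: t) u (fun z hz => hv z (by simp [hz])) hu
    simp only [List.length_append] at h ⊢
    simpa [List.append_assoc] using h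

lemma inner_other (x : String) (hxd : PySem.Str.strIsdigit x = false)
    (hxa : PySem.Str.strIsalpha x = false) (u t : List String) :
    ordenaInner (u ++ x :: t) u.length = u ++ x :: t := by
  cases hu : u.length with
  | zero => simp [ordenaInner]
  | succ j =>
    rw [ordenaInner]
    have hc : (u ++ x :: t).getD (j + 1) "" = x := by
      rw [← hu]; exact getD_at_len u t x ""
    rw [hc, hxd, hxa]
    simp

-- one outer-loop step: inserting x at index |D|+|A|+|O| into the sorted prefix D++A++O
lemma inner_step (D A O t : List String) (x : String)
    (hD : ∀ y ∈ D, pD y = true) (hA : ∀ y ∈ A, pA y = true) (hO : ∀ y ∈ O, pO y = true) :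
    ordenaInner (D ++ A ++ O ++ x :: t) (D.length + A.length + O.length) =
      if pD x then D ++ x :: (A ++ O ++ t)
      else if pA x then D ++ A ++ x :: (O ++ t)
      else D ++ A ++ O ++ x :: t := by
  by_cases hxd : PySem.Str.strIsdigit x = true
  · have hv : ∀ y ∈ A ++ O, PySem.Str.strIsdigit y = false := by
      intro y hy
      rcases List.mem_append.1 hy with h | h
      · have := hA y h; simp [pA] at this; exact this.1
      · have := hO y h; simp [pO] at this; exact this.1
    have hu : D = [] ∨ ∃ u' y, D = u' ++ [y] ∧ PySem.Str.strIsdigit y = true := by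
      rcases List.eq_nil_or_concat D with h | ⟨u', y, h⟩
      · exact Or.inl h
      · refine Or.inr ⟨u', y, by simpa using h, ?_⟩
        have : y ∈ D := by simp [h]
        have := hD y this; simpa [pD] using this
    have hb := bubble_digit x hxd (A ++ O) t D hv hu
    have e1 : D ++ A ++ O ++ x :: t = D ++ (A ++ O) ++ x :: t := by
      simp [List.append_assoc]
    have e2 : D.length + A.length + O.length = D.length + (A ++ O).length := by
      simp [Nat.add_assoc]
    rw [e1, e2, hb]
    have hxd2 : PySem.Chars.strIsdigit x.toList = true := by simpa using hxd
    simp [pD, hxd2, List.append_assoc]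
  · have hxd' : PySem.Str.strIsdigit x = false := by simpa using hxd
    by_cases hxa : PySem.Str.strIsalpha x = true
    · have hv : ∀ y ∈ O, PySem.Str.strIsdigit y = false ∧ PySem.Str.strIsalpha y = false := by
        intro y hy; have := hO y hy; simp [pO] at this; exact this
      have hu : D ++ A = [] ∨ ∃ u' y, D ++ A = u' ++ [y] ∧
          (PySem.Str.strIsdigit y || PySem.Str.strIsalpha y) = true := by
        rcases List.eq_nil_or_concat (D ++ A) with h | ⟨u', y, h⟩
        · exact Or.inl h
        · refine Or.inr ⟨u', y, by simpa using h, ?_⟩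
          have hy : y ∈ D ++ A := by simp [h]
          rcases List.mem_append.1 hy with hm | hm
          · have := hD y hm; simp [pD] at this; simp [this]
          · have := hA y hm; simp [pA] at this; simp [this.2]
      have hb := bubble_alpha x hxd' hxa O t (D ++ A) hv hu
      have e1 : D ++ A ++ O ++ x :: t = (D ++ A) ++ O ++ x :: t := by
        simp [List.append_assoc]
      have e2 : D.length + A.length + O.length = (D ++ A).length + O.length := by
        simp
      rw [e1, e2, hb]
      have hxd2 : PySem.Chars.strIsdigit x.toList = false := by simpa using hxd'
      have hxa2 : PySem.Chars.strIsalpha x.toList = true := by simpa using hxa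
      simp [pD, pA, hxd2, hxa2, List.append_assoc]
    · have hxa' : PySem.Str.strIsalpha x = false := by simpa using hxa
      have hb := inner_other x hxd' hxa' (D ++ A ++ O) t
      have e1 : D ++ A ++ O ++ x :: t = (D ++ A ++ O) ++ x :: t := by
        simp [List.append_assoc]
      have e2 : D.length + A.length + O.length = (D ++ A ++ O).length := by
        simp [Nat.add_assoc]
      rw [e1, e2, hb]
      have hxd2 : PySem.Chars.strIsdigit x.toList = false := by simpa using hxd'
      have hxa2 : PySem.Chars.strIsalpha x.toList = false := by simpa using hxa'
      simp [pD, pA, hxd2, hxa2, List.append_assoc]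

-- outer-loop invariant: prefix already sorted into blocks D, A, O; suffix t untouched
lemma outer_loop : ∀ (t D A O : List String),
    (∀ y ∈ D, pD y = true) → (∀ y ∈ A, pA y = true) → (∀ y ∈ O, pO y = true) →
    (List.range' (D.length + A.length + O.length) t.length 1).foldl
        (fun xs i => ordenaInner xs i) (D ++ A ++ O ++ t)
      = (D ++ t.filter pD) ++ (A ++ t.filter pA) ++ (O ++ t.filter pO) := by
  intro t
  induction t with
  | nil => intro D A O _ _ _; simp
  | cons x t ih =>
    intro D A O hD hA hO
    rw [List.length_cons, List.range'_succ, List.foldl_cons]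
    rw [inner_step D A O t x hD hA hO]
    by_cases hxd : pD x = true
    · have h2 : pA x = false := by simp [pD] at hxd; simp [pA, hxd]
      have h3 : pO x = false := by simp [pD] at hxd; simp [pO, hxd]
      rw [if_pos hxd]
      have hD' : ∀ y ∈ D ++ [x], pD y = true := by
        intro y hy; rcases List.mem_append.1 hy with h | h
        · exact hD y h
        · simp at h; subst h; exact hxd
      have h := ih (D ++ [x]) A O hD' hA hO
      have hlen : (D ++ [x]).length + A.length + O.length
          = D.length + A.length + O.length + 1 := by
        simp only [List.length_append, List.length_cons, List.length_nil]; omega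
      rw [hlen] at h
      have e : D ++ x :: (A ++ O ++ t) = (D ++ [x]) ++ A ++ O ++ t := by
        simp [List.append_assoc]
      rw [e, h]
      simp [List.filter_cons, hxd, h2, h3, List.append_assoc]
    · have hxd' : pD x = false := by simpa using hxd
      rw [if_neg (by simp [hxd'])]
      by_cases hxa : pA x = true
      · have h3 : pO x = false := by
          simp [pA] at hxa; simp [pO, hxa.2]
        rw [if_pos hxa]
        have hA' : ∀ y ∈ A ++ [x], pA y = true := by
          intro y hy; rcases List.mem_append.1 hy with h | h
          · exact hA y h
          · simp at h; subst h; exact hxa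
        have h := ih D (A ++ [x]) O hD hA' hO
        have hlen : D.length + (A ++ [x]).length + O.length
            = D.length + A.length + O.length + 1 := by
          simp only [List.length_append, List.length_cons, List.length_nil]; omega
        rw [hlen] at h
        have e : D ++ A ++ x :: (O ++ t) = D ++ (A ++ [x]) ++ O ++ t := by
          simp [List.append_assoc]
        rw [e, h]
        simp [List.filter_cons, hxd', hxa, h3, List.append_assoc]
      · have hxa' : pA x = false := by simpa using hxa
        have h3 : pO x = true := by
          simp [pD] at hxd'; simp [pA, hxd'] at hxa'; simp [pO, hxd', hxa']
        rw [if_neg (by simp [hxa'])]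
        have hO' : ∀ y ∈ O ++ [x], pO y = true := by
          intro y hy; rcases List.mem_append.1 hy with h | h
          · exact hO y h
          · simp at h; subst h; exact h3
        have h := ih D A (O ++ [x]) hD hA hO'
        have hlen : D.length + A.length + (O ++ [x]).length
            = D.length + A.length + O.length + 1 := by
          simp only [List.length_append, List.length_cons, List.length_nil]; omega
        rw [hlen] at h
        have e : D ++ A ++ O ++ x :: t = D ++ A ++ (O ++ [x]) ++ t := by
          simp [List.append_assoc]
        rw [e, h]
        simp [List.filter_cons, hxd', hxa', h3, List.append_assoc]

lemma ordena_eq_filters (xs : List String) :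
    ordena_tipos xs = xs.filter pD ++ xs.filter pA ++ xs.filter pO := by
  have h := outer_loop xs [] [] [] (by simp) (by simp) (by simp)
  simpa [ordena_tipos, List.range_eq_range'] using h

lemma alt_fold (xs : List String) : ∀ (d a o : List String),
    xs.foldl
      (fun (acc : List String × List String × List String) e =>
        if PySem.Str.strIsdigit e then (acc.1 ++ [e], acc.2.1, acc.2.2)
        else if PySem.Str.strIsalpha e then (acc.1, acc.2.1 ++ [e], acc.2.2)
        else (acc.1, acc.2.1, acc.2.2 ++ [e]))
      (d, a, o)
    = (d ++ xs.filter pD, a ++ xs.filter pA, o ++ xs.filter pO) := by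
  induction xs with
  | nil => intro d a o; simp
  | cons x t ih =>
    intro d a o
    rw [List.foldl_cons]
    by_cases hxd : PySem.Str.strIsdigit x = true
    · have c1 : PySem.Chars.strIsdigit x.toList = true := by simpa using hxd
      rw [if_pos hxd, ih]
      rw [List.filter_cons, List.filter_cons, List.filter_cons]
      rw [if_pos (show pD x = true by simp [pD, c1]),
        if_neg (by simp [pA, c1]), if_neg (by simp [pO, c1])]
      simp [List.append_assoc]
    · have hxd' : PySem.Str.strIsdigit x = false := by simpa using hxd
      have c1 : PySem.Chars.strIsdigit x.toList = false := by simpa using hxd'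
      by_cases hxa : PySem.Str.strIsalpha x = true
      · have c2 : PySem.Chars.strIsalpha x.toList = true := by simpa using hxa
        rw [if_neg (by simp [c1]), if_pos hxa, ih]
        rw [List.filter_cons, List.filter_cons, List.filter_cons]
        rw [if_neg (by simp [pD, c1]), if_pos (show pA x = true by simp [pA, c1, c2]),
          if_neg (by simp [pO, c2])]
        simp [List.append_assoc]
      · have hxa' : PySem.Str.strIsalpha x = false := by simpa using hxa
        have c2 : PySem.Chars.strIsalpha x.toList = false := by simpa using hxa'
        rw [if_neg (by simp [c1]), if_neg (by simp [c2]), ih]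
        rw [List.filter_cons, List.filter_cons, List.filter_cons]
        rw [if_neg (by simp [pD, c1]), if_neg (by simp [pA, c2]),
          if_pos (show pO x = true by simp [pO, c1, c2])]
        simp [List.append_assoc]

lemma alt_eq_filters (xs : List String) :
    ordena_tipos_alt xs = xs.filter pD ++ xs.filter pA ++ xs.filter pO := by
  show (xs.foldl
      (fun (acc : List String × List String × List String) e =>
        if PySem.Str.strIsdigit e then (acc.1 ++ [e], acc.2.1, acc.2.2)
        else if PySem.Str.strIsalpha e then (acc.1, acc.2.1 ++ [e], acc.2.2)
        else (acc.1, acc.2.1, acc.2.2 ++ [e]))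
      ([], [], [])).1 ++ _ ++ _ = _
  rw [alt_fold xs [] [] []]
  simp

-- ===== VERDICT (by name: the statement is the Claim_ definition above) =====
theorem ordena_tipos_spec : Claim_equal_ordena_tipos := by
  intro xs _
  unfold Spec_ordena_tipos
  rw [ordena_eq_filters, alt_eq_filters]
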